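-- pv_equiv track=rewrite | github.com/Nikita-Goncharov/Check-parser | parser_cabala.py | _unique_contours
-- ===== SOURCE A (Python) =====
-- def _unique_contours(contours, data_type="any_else_data"):
--     unique_contours = []
--     for index, contour in enumerate(contours):
--         if index == 0:
--             unique_contours.append(contour)
--             continue
--         else:
--             # Append contour if contour OX more than prev by (minimal_distance)px
--             last_unique_contour = unique_contours[-1]
--             if data_type == "cards":
--                 # For cards OY bigger than prev card coords then it is new card
--                 condition = contour[1] - last_unique_contour[1] >= 30
--             else:
--                 condition = contour[0] - last_unique_contour[0] >= 13
--             if condition: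
--                 unique_contours.append(contour)
--             else:
--                 # Else check square, if current bigger then swap contour in unique_contours
--                 last_unique_contour_square = last_unique_contour[2] * last_unique_contour[3]
--                 contour_square = contour[2] * contour[3]
--                 if contour_square > last_unique_contour_square:
--                     unique_contours.pop()
--                     unique_contours.append(contour)
--
--     return unique_contours
-- ===== SOURCE B (Python) =====
-- def _unique_contours(contours, data_type="any_else_data"):
--     def gap_ok(rep, c):
--         if data_type == "cards":
--             return c[1] - rep[1] >= 30
--         return c[0] - rep[0] >= 13
--
--     def consume_group(rep, rest):
--         # advance through one group: elements not far enough from the evolving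
--         # representative; a bigger-area element takes over the representative.
--         i = 0
--         while i < len(rest) and not gap_ok(rep, rest[i]):
--             c = rest[i]
--             if c[2] * c[3] > rep[2] * rep[3]:
--                 rep = c
--             i += 1
--         return rep, rest[i:]
--
--     out = []
--     rest = contours
--     while rest:
--         rep, rest = consume_group(rest[0], rest[1:])
--         out.append(rep)
--     return out
-- ===== Notes on version B (the rewrite author's own statement) =====
-- stated objective: alternative
-- what changed: B is decomposed as an outer loop over groups with an inner helper that consumes one whole group at a time (returning its representative and the remaining suffix), instead of A's single flat indexed loop that appends and then peeks/pops the result list.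
import Mathlib
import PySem

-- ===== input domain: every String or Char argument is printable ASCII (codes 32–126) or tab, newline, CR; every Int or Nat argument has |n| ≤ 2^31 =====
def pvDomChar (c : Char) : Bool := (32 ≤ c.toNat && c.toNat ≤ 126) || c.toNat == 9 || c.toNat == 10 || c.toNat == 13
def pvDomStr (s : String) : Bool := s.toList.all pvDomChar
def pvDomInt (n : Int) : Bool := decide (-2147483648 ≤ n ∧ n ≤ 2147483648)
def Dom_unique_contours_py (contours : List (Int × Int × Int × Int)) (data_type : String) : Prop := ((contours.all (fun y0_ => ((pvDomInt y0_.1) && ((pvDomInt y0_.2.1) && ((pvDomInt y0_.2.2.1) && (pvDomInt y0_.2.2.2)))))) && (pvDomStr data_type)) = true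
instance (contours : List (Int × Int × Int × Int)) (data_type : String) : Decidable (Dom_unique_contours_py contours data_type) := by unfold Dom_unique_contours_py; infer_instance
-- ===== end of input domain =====

-- B restructures A's flat append/peek/pop loop into an outer loop over groups with an
-- inner helper consuming one whole group at a time; alternative decomposition, same O(n).

-- ===== PORT A =====
-- one iteration of A's for-loop body; the state is A's unique_contours list
def uniqueStepA (data_type : String) (acc : List (Int × Int × Int × Int))
    (ic : Int × (Int × Int × Int × Int)) : List (Int × Int × Int × Int) :=
  if ic.1 == 0 then acc ++ [ic.2]
  else
    -- unique_contours[-1]; none is unreachable (index 0 ran first), Python would raise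
    match PySem.List.pyGet? acc (-1) with
    | none => acc
    | some last =>
      let condition : Bool :=
        if data_type == "cards" then decide (ic.2.2.1 - last.2.1 ≥ 30)
        else decide (ic.2.1 - last.1 ≥ 13)
      if condition then acc ++ [ic.2]
      else if ic.2.2.2.1 * ic.2.2.2.2 > last.2.2.1 * last.2.2.2 then
        -- pop() then append(contour)
        acc.dropLast ++ [ic.2]
      else acc

def unique_contours_py (contours : List (Int × Int × Int × Int)) (data_type : String) :
    List (Int × Int × Int × Int) :=
  (PySem.List.enumerate contours).foldl (uniqueStepA data_type) []

-- ===== PORT B =====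
-- Source B's gap_ok helper
def gapOkB (data_type : String) (rep c : Int × Int × Int × Int) : Bool :=
  if data_type == "cards" then decide (c.2.1 - rep.2.1 ≥ 30)
  else decide (c.1 - rep.1 ≥ 13)

-- Source B's consume_group: walk one group, the bigger-area element takes over the
-- representative; returns the group's representative and the remaining suffix
def consumeGroupB (data_type : String) (rep : Int × Int × Int × Int) :
    List (Int × Int × Int × Int) → (Int × Int × Int × Int) × List (Int × Int × Int × Int)
  | [] => (rep, [])
  | c :: rest =>
    if gapOkB data_type rep c then (rep, c :: rest)
    else if c.2.2.1 * c.2.2.2 > rep.2.2.1 * rep.2.2.2 then consumeGroupB data_type c rest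
    else consumeGroupB data_type rep rest

theorem consumeGroupB_len_le (data_type : String) :
    ∀ (l : List (Int × Int × Int × Int)) (rep : Int × Int × Int × Int),
    (consumeGroupB data_type rep l).2.length ≤ l.length := by
  intro l
  induction l with
  | nil => intro rep; simp [consumeGroupB]
  | cons c rest ih =>
    intro rep
    simp only [consumeGroupB]
    split
    · simp
    · split
      · exact Nat.le_succ_of_le (ih c)
      · exact Nat.le_succ_of_le (ih rep)

-- Source B's outer while-loop over groups
def uniqueOuterB (data_type : String) :
    List (Int × Int × Int × Int) → List (Int × Int × Int × Int)
  | [] => []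
  | c :: rest =>
    let p := consumeGroupB data_type c rest
    p.1 :: uniqueOuterB data_type p.2
termination_by l => l.length
decreasing_by
  exact Nat.lt_succ_of_le (consumeGroupB_len_le data_type rest c)

def unique_contours_py_alt (contours : List (Int × Int × Int × Int)) (data_type : String) :
    List (Int × Int × Int × Int) :=
  uniqueOuterB data_type contours

-- ===== PRECONDITION & SPEC =====
def Spec_unique_contours_py (contours : List (Int × Int × Int × Int)) (data_type : String) (out : List (Int × Int × Int × Int)) : Prop := out = unique_contours_py_alt contours data_type
instance (contours : List (Int × Int × Int × Int)) (data_type : String) (out : List (Int × Int × Int × Int)) : Decidable (Spec_unique_contours_py contours data_type out) := by unfold Spec_unique_contours_py; infer_instance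

-- ===== CLAIM (what is proved, stated in full; the proofs are below) =====
def Claim_equal_unique_contours_py : Prop := ∀ (contours : List (Int × Int × Int × Int)) (data_type : String), Dom_unique_contours_py contours data_type → Spec_unique_contours_py contours data_type (unique_contours_py contours data_type)

-- ===== LEMMAS AND PROOFS =====

theorem uniqueOuterB_cons (data_type : String) (c : Int × Int × Int × Int)
    (rest : List (Int × Int × Int × Int)) :
    uniqueOuterB data_type (c :: rest)
      = (consumeGroupB data_type c rest).1
          :: uniqueOuterB data_type (consumeGroupB data_type c rest).2 := by
  rw [uniqueOuterB]

-- invariant: with a nonempty accumulator pref ++ [rep] and positive indices, A's fold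
-- equals the finished prefix, then the current group's final representative, then B's
-- outer loop restarted on the suffix consume_group leaves
theorem uniqueFold_eq_groups (data_type : String) (rest : List (Int × Int × Int × Int)) :
    ∀ (s : Int), 1 ≤ s → ∀ (pref : List (Int × Int × Int × Int)) (rep : Int × Int × Int × Int),
    (PySem.List.enumerate rest s).foldl (uniqueStepA data_type) (pref ++ [rep])
      = pref ++ (consumeGroupB data_type rep rest).1
          :: uniqueOuterB data_type (consumeGroupB data_type rep rest).2 := by
  induction rest with
  | nil =>
    intro s hs pref rep
    simp [PySem.List.enumerate_nil, consumeGroupB, uniqueOuterB]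
  | cons c rest ih =>
    intro s hs pref rep
    rw [PySem.List.enumerate_cons, List.foldl_cons]
    have hstep : uniqueStepA data_type (pref ++ [rep]) (s, c) =
        (if gapOkB data_type rep c then (pref ++ [rep]) ++ [c]
         else if c.2.2.1 * c.2.2.2 > rep.2.2.1 * rep.2.2.2 then pref ++ [c]
         else pref ++ [rep]) := by
      simp only [uniqueStepA, gapOkB]
      have hne : s ≠ 0 := by omega
      have hs0 : (s == (0 : Int)) = false := by simp [hne]
      rw [hs0]
      simp only [Bool.false_eq_true, if_false,
        PySem.List.pyGet?_neg_one_append_singleton, List.dropLast_concat]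
      rfl
    rw [hstep]
    simp only [consumeGroupB]
    by_cases hfar : gapOkB data_type rep c = true
    · rw [if_pos hfar, if_pos hfar, ih (s+1) (by omega) (pref ++ [rep]) c,
        uniqueOuterB_cons, List.append_assoc, List.singleton_append]
    · rw [if_neg hfar, if_neg hfar]
      by_cases hsq : c.2.2.1 * c.2.2.2 > rep.2.2.1 * rep.2.2.2
      · rw [if_pos hsq, if_pos hsq, ih (s+1) (by omega) pref c]
      · rw [if_neg hsq, if_neg hsq, ih (s+1) (by omega) pref rep]

-- ===== VERDICT (by name: the statement is the Claim_ definition above) =====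
theorem unique_contours_py_spec : Claim_equal_unique_contours_py := by
  intro contours data_type _
  unfold Spec_unique_contours_py unique_contours_py unique_contours_py_alt
  cases contours with
  | nil => simp [PySem.List.enumerate_nil, uniqueOuterB]
  | cons c rest =>
    rw [PySem.List.enumerate_cons, List.foldl_cons]
    have h0 : uniqueStepA data_type [] (0, c) = [] ++ [c] := by
      simp [uniqueStepA]
    rw [h0]
    simp only [Int.zero_add]
    rw [uniqueFold_eq_groups data_type rest 1 (by omega) [] c, uniqueOuterB_cons]
    simp
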